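-- pv_equiv track=rewrite | github.com/JadielTeofilo/General-Algorithms | src/green_book/bit_manipulation/fixed_flip_to_win.py | _get_window
-- ===== SOURCE A (Python) =====
-- from typing import Iterable, Optional
-- import collections
--
-- Window = collections.namedtuple('Window', 'left_ones mid_zeros right_ones')
--
-- def _get_window(number: int) -> Iterable[Window]:
--     """ Builds sliding windows when the mid element is a 0 bit """
--     bit_length_encoding: Iterable[int] = _get_length_encoding(number)
--     left: int = 0
--     mid: int = 0
--     right: int = 0
--     mid_has_zero_bit: bool = False
--     for encoding in bit_length_encoding:
--         left = mid
--         mid = right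
--         right = encoding
--         if mid_has_zero_bit and mid == 1:
--             yield Window(left, mid, right)
--         mid_has_zero_bit = not mid_has_zero_bit
--
-- def _get_length_encoding(number: int) -> Iterable[int]:
--     """ Finds the iterable of the bit length encoding
--
--         Always starts with the bit 0, meaning it adds
--         an encoding of length one if the first bit is
--         a one
--         """
--     counter: int = 0
--     last_bit: Optional[int] = None
--     for bit in _get_bits(number):
--         if last_bit is None and bit == 1:
--             # Yields one representing a encoding of
--             # size one for bit 0
--             yield 1
--         if last_bit is not None and last_bit != bit:
--             yield counter
--             counter = 0
--         counter += 1
--         last_bit = bit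
--
--     if counter and counter > 0:
--         yield counter
--
-- def _get_bits(number: int) -> Iterable[int]:
--     number %= 0x100000000
--     while number != 0:
--         yield number & 1
--         number >>= 1
-- ===== SOURCE B (Python) =====
-- import collections
--
-- Window = collections.namedtuple('Window', 'left_ones mid_zeros right_ones')
--
-- def _get_window(number: int):
--     """ Same windows as A, built by materialising the run-length encoding
--         and consuming it two runs at a time (with the previous odd run as
--         the left neighbour) instead of a shift register with a parity flag. """
--     bits = []
--     m = number % 0x100000000
--     while m != 0:
--         bits.append(m & 1)
--         m >>= 1
--     enc = [1] if bits and bits[0] == 1 else []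
--     while bits:
--         head = bits[0]
--         k = 0
--         while k < len(bits) and bits[k] == head:
--             k += 1
--         enc.append(k)
--         bits = bits[k:]
--     prev = 0
--     while len(enc) >= 2:
--         a, b = enc[0], enc[1]
--         if a == 1:
--             yield Window(prev, a, b)
--         prev = b
--         enc = enc[2:]
-- ===== Notes on version B (the rewrite author's own statement) =====
-- stated objective: alternative
-- what changed: B materialises the bit run-length encoding by grouping consecutive equal bits (two-pointer grouping) and then consumes the encoding two runs at a time, carrying the previous odd run as the left neighbour, instead of A's streaming left/mid/right shift register with a parity toggle and a counter/last-bit encoder.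
import Mathlib
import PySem

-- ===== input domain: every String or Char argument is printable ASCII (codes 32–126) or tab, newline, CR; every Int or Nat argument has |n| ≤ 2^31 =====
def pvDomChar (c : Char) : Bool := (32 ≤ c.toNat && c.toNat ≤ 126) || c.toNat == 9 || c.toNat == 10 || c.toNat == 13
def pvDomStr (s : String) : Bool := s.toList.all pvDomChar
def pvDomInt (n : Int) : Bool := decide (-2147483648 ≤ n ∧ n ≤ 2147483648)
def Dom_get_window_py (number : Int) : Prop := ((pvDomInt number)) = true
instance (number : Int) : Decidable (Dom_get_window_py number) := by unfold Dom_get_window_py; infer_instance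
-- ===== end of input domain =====

-- B consumes the run-length encoding two runs at a time instead of A's shift register + parity flag: alternative decomposition, same cost.

-- shared helper: _get_bits (both Source A and Source B contain this identical while-loop;
-- the argument is 'number % 0x100000000', hence nonnegative, so 'n ≤ 0' = 'n = 0' there
-- and 'n & 1' = 'n mod 2', 'n >>= 1' = floor division by 2)
def pvBits (n : Int) : List Int :=
  if n ≤ 0 then []
  else PySem.Int.mod n 2 :: pvBits (PySem.Int.floordiv n 2)
termination_by n.toNat
decreasing_by
  have h2 : PySem.Int.floordiv n 2 = n / 2 := PySem.Int.floordiv_eq_ediv_of_pos (by omega)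
  simp only [h2]; omega

-- ===== PORT A =====
-- one step of the loop in _get_length_encoding; state = (counter, last_bit, yielded)
def pvEncStep (s : Int × Option Int × List Int) (bit : Int) : Int × Option Int × List Int :=
  let acc1 := if s.2.1 = none ∧ bit = 1 then s.2.2 ++ [1] else s.2.2
  let p := if s.2.1 ≠ none ∧ s.2.1 ≠ some bit then ((0 : Int), acc1 ++ [s.1]) else (s.1, acc1)
  (p.1 + 1, some bit, p.2)

-- _get_length_encoding as a list: fold the loop, then the trailing 'if counter and counter > 0: yield counter'
def pvEncodeA (bits : List Int) : List Int :=
  let s := bits.foldl pvEncStep (0, none, [])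
  if s.1 ≠ 0 ∧ s.1 > 0 then s.2.2 ++ [s.1] else s.2.2

-- one step of the loop in _get_window; state = (left, mid, right, mid_has_zero_bit, yielded)
def pvWinStep (s : Int × Int × Int × Bool × List (Int × Int × Int)) (e : Int) :
    Int × Int × Int × Bool × List (Int × Int × Int) :=
  let l := s.2.1
  let m := s.2.2.1
  let r := e
  let acc := if s.2.2.2.1 = true ∧ m = 1 then s.2.2.2.2 ++ [(l, m, r)] else s.2.2.2.2
  (l, m, r, !s.2.2.2.1, acc)

def get_window_py (number : Int) : List (Int × Int × Int) :=
  (((pvEncodeA (pvBits (PySem.Int.mod number 4294967296))).foldl pvWinStep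
      (0, 0, 0, false, [])).2.2.2.2)

-- ===== PORT B =====
-- inner while: k = number of leading elements of the list equal to head
def pvCountLead (x : Int) : List Int → Nat
  | [] => 0
  | y :: ys => if y = x then 1 + pvCountLead x ys else 0

-- outer while over bits: append each run length, drop the run
def pvAltRuns (l : List Int) : List Int :=
  match l with
  | [] => []
  | x :: xs =>
    let k := pvCountLead x xs
    (Int.ofNat (k + 1)) :: pvAltRuns (xs.drop k)
termination_by l.length
decreasing_by simp only [List.length_drop, List.length_cons]; omega

-- final while: consume the encoding two runs at a time, prev = previous odd run
def pvAltWin (prev : Int) : List Int → List (Int × Int × Int)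
  | a :: b :: rest => (if a = 1 then [(prev, a, b)] else []) ++ pvAltWin b rest
  | _ => []

def get_window_py_alt (number : Int) : List (Int × Int × Int) :=
  let bits := pvBits (PySem.Int.mod number 4294967296)
  let pre : List Int := if bits ≠ [] ∧ bits.headD 0 = 1 then [1] else []
  pvAltWin 0 (pre ++ pvAltRuns bits)

-- ===== PRECONDITION & SPEC =====
def Spec_get_window_py (number : Int) (out : List (Int × Int × Int)) : Prop := out = get_window_py_alt number
instance (number : Int) (out : List (Int × Int × Int)) : Decidable (Spec_get_window_py number out) := by unfold Spec_get_window_py; infer_instance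

-- ===== CLAIM (what is proved, stated in full; the proofs are below) =====
def Claim_equal_get_window_py : Prop := ∀ (number : Int), Dom_get_window_py number → Spec_get_window_py number (get_window_py number)

-- ===== LEMMAS AND PROOFS =====

theorem pvOfNat_succ (k : Nat) : Int.ofNat (k + 1) = 1 + Int.ofNat k := by
  simp only [Int.ofNat_eq_natCast, Nat.cast_add, Nat.cast_one]; ring

-- A's encoder continuation: seen a run of x of length c so far
def pvEncCont (x c : Int) : List Int → List Int
  | [] => [c]
  | b :: t => if b = x then pvEncCont x (c + 1) t else c :: pvEncCont b 1 t

def pvFinalize (s : Int × Option Int × List Int) : List Int :=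
  if s.1 ≠ 0 ∧ s.1 > 0 then s.2.2 ++ [s.1] else s.2.2

theorem pvEnc_fold (bs : List Int) : ∀ (x c : Int) (acc : List Int), 0 < c →
    pvFinalize (bs.foldl pvEncStep (c, some x, acc)) = acc ++ pvEncCont x c bs := by
  induction bs with
  | nil =>
    intro x c acc hc
    have hc0 : c ≠ 0 := by omega
    simp [pvFinalize, pvEncCont, hc, hc0]
  | cons b t ih =>
    intro x c acc hc
    by_cases hbx : b = x
    · subst hbx
      have : pvEncStep (c, some b, acc) b = (c + 1, some b, acc) := by
        simp [pvEncStep]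
      rw [List.foldl_cons, this, ih b (c + 1) acc (by omega)]
      simp [pvEncCont]
    · have : pvEncStep (c, some x, acc) b = (1, some b, acc ++ [c]) := by
        simp [pvEncStep, Ne.symm hbx]
      rw [List.foldl_cons, this, ih b 1 (acc ++ [c]) (by norm_num)]
      simp [pvEncCont, hbx]

theorem pvEncCont_eq_altRuns (bs : List Int) : ∀ (x c : Int),
    pvEncCont x c bs = (c + Int.ofNat (pvCountLead x bs)) :: pvAltRuns (bs.drop (pvCountLead x bs)) := by
  induction bs with
  | nil => intro x c; simp [pvEncCont, pvCountLead, pvAltRuns.eq_1]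
  | cons b t ih =>
    intro x c
    by_cases hbx : b = x
    · subst hbx
      have hk : pvCountLead b (b :: t) = 1 + pvCountLead b t := by simp [pvCountLead]
      rw [show pvEncCont b c (b :: t) = pvEncCont b (c + 1) t from by simp [pvEncCont],
        ih b (c + 1), hk]
      congr 1
      · rw [Nat.add_comm, pvOfNat_succ]; ring
      · rw [Nat.add_comm, List.drop_succ_cons]
    · rw [show pvEncCont x c (b :: t) = c :: pvEncCont b 1 t from by simp [pvEncCont, hbx],
        show pvCountLead x (b :: t) = 0 from by simp [pvCountLead, hbx]]
      simp only [List.drop_zero]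
      rw [pvAltRuns.eq_2, ih b 1, pvOfNat_succ]
      congr 2
      simp [Int.ofNat_eq_natCast]

theorem pvEncodeA_eq (bits : List Int) :
    pvEncodeA bits =
      (if bits ≠ [] ∧ bits.headD 0 = 1 then [1] else []) ++ pvAltRuns bits := by
  cases bits with
  | nil => simp [pvEncodeA, pvAltRuns.eq_1]
  | cons x xs =>
    have h1 : pvEncStep (0, none, []) x = (1, some x, if x = 1 then [1] else []) := by
      by_cases hx : x = 1 <;> simp [pvEncStep, hx]
    have : pvEncodeA (x :: xs) = pvFinalize ((x :: xs).foldl pvEncStep (0, none, [])) := rfl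
    rw [this, List.foldl_cons, h1, pvEnc_fold xs x 1 _ (by norm_num),
      pvEncCont_eq_altRuns xs x 1]
    rw [pvAltRuns.eq_2,
      (pvOfNat_succ (pvCountLead x xs)).symm]
    by_cases hx : x = 1 <;> simp [hx]

theorem pvWin_fold : ∀ (rest : List Int) (l m r : Int) (acc : List (Int × Int × Int)),
    ((rest.foldl pvWinStep (l, m, r, false, acc)).2.2.2.2) = acc ++ pvAltWin r rest
  | [], l, m, r, acc => by simp [pvAltWin]
  | [a], l, m, r, acc => by simp [pvWinStep, pvAltWin]
  | a :: b :: rest, l, m, r, acc => by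
    have s1 : pvWinStep (l, m, r, false, acc) a = (m, r, a, true, acc) := by
      simp [pvWinStep]
    have s2 : pvWinStep (m, r, a, true, acc) b =
        (r, a, b, false, acc ++ if a = 1 then [(r, a, b)] else []) := by
      by_cases ha : a = 1 <;> simp [pvWinStep, ha]
    rw [List.foldl_cons, s1, List.foldl_cons, s2, pvWin_fold rest r a b _]
    by_cases ha : a = 1 <;> simp [pvAltWin, ha]

-- ===== VERDICT (by name: the statement is the Claim_ definition above) =====
theorem get_window_py_spec : Claim_equal_get_window_py := by
  intro number _
  show get_window_py number = get_window_py_alt number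
  unfold get_window_py get_window_py_alt
  rw [pvEncodeA_eq, pvWin_fold]
  simp
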